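-- pv_equiv track=rewrite | github.com/GregoryMorse/cryptopals | utility.py | getCk
-- ===== SOURCE A (Python) =====
-- def posRemainder(dividend, divisor):
--   if (dividend >= 0 and dividend < divisor): return dividend
--   r = dividend % divisor
--   return r + divisor if r < 0 else r
--
-- def modInverse(a, n):
--   i, v, d = n, 0, 1
--   if (a < 0): a = a % n
--   while (a > 0):
--     t, x = i // a, a;
--     a = i % x
--     i = x
--     x = d
--     d = v - t * x
--     v = x
--   v %= n
--   if (v < 0): v = (v + n) % n
--   return v
--
-- def getCk(terms, a, b, gf):
--   c = [0] * (terms + 1)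
--   if (terms == 0): return c
--   c[1] = posRemainder(-a * modInverse(5, gf), gf)
--   if (terms == 1): return c
--   c[2] = posRemainder(-b * modInverse(7, gf), gf)
--   for k in range(3, terms + 1):
--     c[k] = 0
--     for h in range(1, k - 2 + 1): c[k] += c[h] * c[k - 1 - h]
--     c[k] *= (3 * modInverse((k - 2) * (2 * k + 3), gf))
--     c[k] = posRemainder(c[k], gf)
--   return c
-- ===== SOURCE B (Python) =====
-- def posRemainder(dividend, divisor):
--   if (dividend >= 0 and dividend < divisor): return dividend
--   r = dividend % divisor
--   return r + divisor if r < 0 else r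
--
-- def modInverse(a, n):
--   i, v, d = n, 0, 1
--   if (a < 0): a = a % n
--   while (a > 0):
--     t, x = i // a, a;
--     a = i % x
--     i = x
--     x = d
--     d = v - t * x
--     v = x
--   v %= n
--   if (v < 0): v = (v + n) % n
--   return v
--
-- def getCk(terms, a, b, gf):
--   # forward-scatter formulation: acc[m] accumulates, exactly, the convolution
--   # sum that A gathers for c[m]; each finalized coefficient c[i] pushes its
--   # products forward (2*c[i]*c[j] off-diagonal, c[i]*c[i] on the diagonal).
--   c = [0] * (terms + 1)
--   if terms == 0: return c
--   acc = [0] * (terms + 1)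
--   def scatter(i):
--     for j in range(1, i):
--       m = i + j + 1
--       if m <= terms: acc[m] += 2 * c[i] * c[j]
--     if 2 * i + 1 <= terms: acc[2 * i + 1] += c[i] * c[i]
--   c[1] = posRemainder(-a * modInverse(5, gf), gf)
--   scatter(1)
--   if terms == 1: return c
--   c[2] = posRemainder(-b * modInverse(7, gf), gf)
--   scatter(2)
--   for k in range(3, terms + 1):
--     c[k] = posRemainder(acc[k] * 3 * modInverse((k - 2) * (2 * k + 3), gf), gf)
--     scatter(k)
--   return c
-- ===== Notes on version B (the rewrite author's own statement) =====
-- stated objective: alternative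
-- what changed: Replaces A's backward gather (inner loop summing c[h]*c[k-1-h] into c[k]) by a forward scatter: a second accumulator array acc receives 2*c[i]*c[j] (and c[i]*c[i] on the diagonal) as soon as c[i] is finalized, so each c[k] is just posRemainder(acc[k]*3*modInverse(...)) with no inner gather at finalization.
import Mathlib
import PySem

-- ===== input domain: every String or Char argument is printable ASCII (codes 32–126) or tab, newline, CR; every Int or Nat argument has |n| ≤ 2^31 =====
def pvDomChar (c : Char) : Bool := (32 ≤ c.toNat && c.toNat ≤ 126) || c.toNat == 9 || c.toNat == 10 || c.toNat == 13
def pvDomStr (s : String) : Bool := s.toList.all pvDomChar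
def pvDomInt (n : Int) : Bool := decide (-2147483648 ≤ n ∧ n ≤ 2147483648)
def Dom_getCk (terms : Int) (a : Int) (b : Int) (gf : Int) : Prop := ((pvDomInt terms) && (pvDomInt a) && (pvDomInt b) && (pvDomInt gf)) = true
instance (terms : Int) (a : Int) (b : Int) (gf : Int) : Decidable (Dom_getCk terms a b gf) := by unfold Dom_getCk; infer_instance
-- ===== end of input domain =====

-- B replaces A's backward gather (inner loop summing c[h]*c[k-1-h] into c[k]) by a
-- forward scatter: an accumulator array acc receives 2*c[i]*c[j] (and c[i]*c[i] on
-- the diagonal) as soon as c[i] is finalized, so c[k] is read off acc[k] directly.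
-- Objective: alternative decomposition, same exact integer arithmetic.

-- ===== PORT A =====
-- shared module helpers (used verbatim by both Pythons)
def posRemainder (dividend : Int) (divisor : Int) : Int :=
  if dividend ≥ 0 ∧ dividend < divisor then dividend
  else
    let r := PySem.Int.mod dividend divisor
    if r < 0 then r + divisor else r

-- the 'while a > 0' loop of modInverse; state (a, i, v, d), returns v on exit
def modInvLoop (a : Int) (i : Int) (v : Int) (d : Int) : Int :=
  if h : a > 0 then
    modInvLoop (PySem.Int.mod i a) a d (v - PySem.Int.floordiv i a * d)
  else v
termination_by a.toNat
decreasing_by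
  have h1 := PySem.Int.mod_nonneg i h
  have h2 := PySem.Int.mod_lt i h
  omega

def modInverse (a : Int) (n : Int) : Int :=
  let a' := if a < 0 then PySem.Int.mod a n else a
  let v := PySem.Int.mod (modInvLoop a' n 0 1) n
  if v < 0 then PySem.Int.mod (v + n) n else v

-- literal transliteration of A: preallocated list, indexed gather writing into c[k]
-- (in-range nonnegative Python reads/writes c[j] ported as getD/set; all touched
--  indices are nonnegative and in range on Pre_ inputs)
def getCk (terms : Int) (a : Int) (b : Int) (gf : Int) : List Int :=
  let c := List.replicate (terms + 1).toNat 0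
  if terms == 0 then c else
  let c := c.set 1 (posRemainder (-a * modInverse 5 gf) gf)
  if terms == 1 then c else
  let c := c.set 2 (posRemainder (-b * modInverse 7 gf) gf)
  (PySem.List.pyRange 3 (terms + 1) 1).foldl (fun c k =>
    let c := c.set k.toNat 0
    let c := (PySem.List.pyRange 1 (k - 2 + 1) 1).foldl (fun c h =>
      c.set k.toNat (c.getD k.toNat 0 + c.getD h.toNat 0 * c.getD (k - 1 - h).toNat 0)) c
    let c := c.set k.toNat (c.getD k.toNat 0 * (3 * modInverse ((k - 2) * (2 * k + 3)) gf))
    c.set k.toNat (posRemainder (c.getD k.toNat 0) gf)) c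

-- ===== PORT B =====
-- inner body of B's scatter loop ('acc[m] += 2*c[i]*c[j] if m <= terms')
def scatJ (terms : Int) (c : List Int) (i : Int) (acc : List Int) (j : Int) : List Int :=
  let m := i + j + 1
  if m ≤ terms then acc.set m.toNat (acc.getD m.toNat 0 + 2 * c.getD i.toNat 0 * c.getD j.toNat 0)
  else acc

-- B's 'scatter(i)': push the finalized coefficient c[i] forward into acc
def scatterB (terms : Int) (c : List Int) (acc : List Int) (i : Int) : List Int :=
  let acc := (PySem.List.pyRange 1 i 1).foldl (scatJ terms c i) acc
  if 2 * i + 1 ≤ terms then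
    acc.set (2 * i + 1).toNat (acc.getD (2 * i + 1).toNat 0 + c.getD i.toNat 0 * c.getD i.toNat 0)
  else acc

def getCk_alt (terms : Int) (a : Int) (b : Int) (gf : Int) : List Int :=
  let c := List.replicate (terms + 1).toNat 0
  if terms == 0 then c else
  let acc := List.replicate (terms + 1).toNat 0
  let c := c.set 1 (posRemainder (-a * modInverse 5 gf) gf)
  let acc := scatterB terms c acc 1
  if terms == 1 then c else
  let c := c.set 2 (posRemainder (-b * modInverse 7 gf) gf)
  let acc := scatterB terms c acc 2
  let st := (PySem.List.pyRange 3 (terms + 1) 1).foldl (fun st k =>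
    let c := st.1.set k.toNat
      (posRemainder (st.2.getD k.toNat 0 * 3 * modInverse ((k - 2) * (2 * k + 3)) gf) gf)
    (c, scatterB terms c st.2 k)) (c, acc)
  st.1

-- ===== PRECONDITION & SPEC =====
-- Pre_ excludes exactly the inputs where the Python A raises: terms < 0 (IndexError
-- writing c[1] into a too-short list) and gf = 0 with terms ≥ 1 (ZeroDivisionError in
-- modInverse).  A returns normally on every other input.
def Pre_getCk (terms : Int) (a : Int) (b : Int) (gf : Int) : Prop :=
  0 ≤ terms ∧ (gf ≠ 0 ∨ terms = 0)
instance (terms : Int) (a : Int) (b : Int) (gf : Int) : Decidable (Pre_getCk terms a b gf) := by unfold Pre_getCk; infer_instance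

def pvWitness_getCk : Int × Int × Int × Int := (8, 3, 5, 37)

def Spec_getCk (terms : Int) (a : Int) (b : Int) (gf : Int) (out : List Int) : Prop := out = getCk_alt terms a b gf
instance (terms : Int) (a : Int) (b : Int) (gf : Int) (out : List Int) : Decidable (Spec_getCk terms a b gf out) := by unfold Spec_getCk; infer_instance

-- ===== CLAIM (what is proved, stated in full; the proofs are below) =====
def Claim_equal_getCk : Prop := ∀ (terms : Int) (a : Int) (b : Int) (gf : Int), Dom_getCk terms a b gf → Pre_getCk terms a b gf → Spec_getCk terms a b gf (getCk terms a b gf)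

-- ===== LEMMAS AND PROOFS =====

-- the common intermediate ('spec') form both proofs target: coefficients 1..k kept in
-- an append-grown list, the next one a dot product of the prefix with its reverse
def stepSpec (gf : Int) (cs : List Int) (k : Int) : List Int :=
  let body := cs.dropLast
  let s := (body.zip body.reverse).foldl (fun s p => s + p.1 * p.2) 0
  cs ++ [posRemainder (s * 3 * modInverse ((k - 2) * (2 * k + 3)) gf) gf]

def stepA (gf : Int) (c : List Int) (k : Int) : List Int :=
  let c := c.set k.toNat 0
  let c := (PySem.List.pyRange 1 (k - 2 + 1) 1).foldl (fun c h =>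
    c.set k.toNat (c.getD k.toNat 0 + c.getD h.toNat 0 * c.getD (k - 1 - h).toNat 0)) c
  let c := c.set k.toNat (c.getD k.toNat 0 * (3 * modInverse ((k - 2) * (2 * k + 3)) gf))
  c.set k.toNat (posRemainder (c.getD k.toNat 0) gf)

def stepB (terms gf : Int) (st : List Int × List Int) (k : Int) : List Int × List Int :=
  let c := st.1.set k.toNat
    (posRemainder (st.2.getD k.toNat 0 * 3 * modInverse ((k - 2) * (2 * k + 3)) gf) gf)
  (c, scatterB terms c st.2 k)

-- the symmetric partial convolution: sum of c[i]*c[j] over i,j ≤ t with i+j+1 = m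
def gsum (c : List Int) (t m : Nat) : Int :=
  ∑ i ∈ Finset.range (t + 1), ∑ j ∈ Finset.range (t + 1),
    (if i + j + 1 = m then c.getD i 0 * c.getD j 0 else 0)

lemma getD_set_self' (l : List Int) (k : Nat) (v : Int) (h : k < l.length) :
    (l.set k v).getD k 0 = v := by
  simp [List.getD_eq_getElem?_getD, h]

lemma getD_set_ne' (l : List Int) (k j : Nat) (v : Int) (h : j ≠ k) :
    (l.set k v).getD j 0 = l.getD j 0 := by
  simp [List.getD_eq_getElem?_getD, List.getElem?_set_ne (by omega : k ≠ j)]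

lemma getD_cons_append (cs rest : List Int) (j : Nat) (h1 : 1 ≤ j) (h2 : j ≤ cs.length) :
    (0 :: cs ++ rest).getD j 0 = cs.getD (j - 1) 0 := by
  obtain ⟨j', rfl⟩ : ∃ j', j = j' + 1 := ⟨j - 1, by omega⟩
  simp [List.getD_eq_getElem?_getD, List.getElem?_append_left (by omega : j' < cs.length)]

lemma set_cons_append (cs : List Int) (p : Nat) (v : Int) (hp : 0 < p) :
    (0 :: cs ++ List.replicate p 0).set (cs.length + 1) v
      = 0 :: (cs ++ [v]) ++ List.replicate (p - 1) 0 := by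
  obtain ⟨p', rfl⟩ : ∃ p', p = p' + 1 := ⟨p - 1, by omega⟩
  simp [List.set_cons_succ, List.set_append_right, List.replicate_succ, List.append_assoc]

-- the inner gather loop of A accumulated in cell kk, reads never touching kk
lemma innerA (gf k : Int) (kk : Nat) (hs : List Int)
    (hh : ∀ h ∈ hs, h.toNat ≠ kk ∧ (k - 1 - h).toNat ≠ kk)
    (c0 : List Int) (hlen : kk < c0.length) :
    ∀ v : Int,
    hs.foldl (fun c h => c.set kk (c.getD kk 0 + c.getD h.toNat 0 * c.getD (k - 1 - h).toNat 0))
      (c0.set kk v)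
    = c0.set kk (v + (hs.map (fun h => c0.getD h.toNat 0 * c0.getD (k - 1 - h).toNat 0)).sum) := by
  induction hs with
  | nil => intro v; simp
  | cons h t ih =>
    intro v
    obtain ⟨hne1, hne2⟩ := hh h (by simp)
    have step : (c0.set kk v).set kk
        ((c0.set kk v).getD kk 0 + (c0.set kk v).getD h.toNat 0 * (c0.set kk v).getD (k - 1 - h).toNat 0)
        = c0.set kk (v + c0.getD h.toNat 0 * c0.getD (k - 1 - h).toNat 0) := by
      rw [getD_set_self' _ _ _ hlen, getD_set_ne' _ _ _ _ hne1, getD_set_ne' _ _ _ _ hne2,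
        List.set_set]
    simp only [List.foldl_cons, step, ih (fun x hx => hh x (by simp [hx])), List.map_cons,
      List.sum_cons]
    ring_nf

-- A's step on the invariant shape equals the spec's append step
lemma step_eq (gf : Int) (cs : List Int) (p : Nat) (hK : 2 ≤ cs.length) (hp : 0 < p) :
    stepA gf (0 :: cs ++ List.replicate p 0) ((cs.length : Int) + 1)
      = 0 :: stepSpec gf cs ((cs.length : Int) + 1) ++ List.replicate (p - 1) 0 := by
  set K := cs.length with hKdef
  have hkk : (((K : Int) + 1)).toNat = K + 1 := by omega
  set c0 : List Int := 0 :: cs ++ List.replicate p 0 with hc0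
  have hc0len : c0.length = K + p + 1 := by
    rw [hc0]
    simp [← hKdef]
    try omega
  have hlen : K + 1 < c0.length := by omega
  have hbody : cs.dropLast.length = K - 1 := by simp [← hKdef]
  have hrange : PySem.List.pyRange 1 ((K : Int) + 1 - 2 + 1) 1
      = (List.range (K - 1)).map (fun j : Nat => (1 : Int) + (j : Int)) := by
    rw [PySem.List.pyRange_one]
    rw [show (((K : Int) + 1 - 2 + 1) - 1).toNat = K - 1 from by omega]
  have hread : ∀ h ∈ PySem.List.pyRange 1 ((K : Int) + 1 - 2 + 1) 1,
      h.toNat ≠ K + 1 ∧ ((K : Int) + 1 - 1 - h).toNat ≠ K + 1 := by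
    intro h hm
    rw [PySem.List.mem_pyRange_one] at hm
    constructor <;> omega
  have hlist : (List.range (K - 1)).map
        (fun j : Nat => c0.getD ((1 : Int) + (j : Int)).toNat 0 * c0.getD ((K : Int) + 1 - 1 - ((1 : Int) + (j : Int))).toNat 0)
      = (cs.dropLast.zip cs.dropLast.reverse).map (fun q => q.1 * q.2) := by
    apply List.ext_getElem
    · simp [hbody]
      try omega
    · intro i hi1 hi2
      have hiK : i < K - 1 := by simpa using hi1
      simp only [List.getElem_map, List.getElem_range, List.getElem_zip, List.getElem_reverse,
        List.getElem_dropLast]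
      have e1 : c0.getD ((1 : Int) + (i : Int)).toNat 0 = cs.getD i 0 := by
        have h1 : ((1 : Int) + (i : Int)).toNat = i + 1 := by omega
        rw [h1, hc0, getD_cons_append _ _ _ (by omega) (by omega)]
        simp
      have e2 : c0.getD ((K : Int) + 1 - 1 - ((1 : Int) + (i : Int))).toNat 0 = cs.getD (K - 2 - i) 0 := by
        have h1 : ((K : Int) + 1 - 1 - (1 + (i : Int))).toNat = K - 1 - i := by omega
        rw [h1, hc0, getD_cons_append _ _ _ (by omega) (by omega)]
        congr 1
        omega
      rw [e1, e2]
      have hidx : cs.dropLast.length - 1 - i = K - 2 - i := by omega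
      simp only [hidx]
      rw [List.getD_eq_getElem _ _ (show i < cs.length from by omega),
        List.getD_eq_getElem _ _ (show K - 2 - i < cs.length from by omega)]
  have key : ((PySem.List.pyRange 1 ((K : Int) + 1 - 2 + 1) 1).map
        (fun h => c0.getD h.toNat 0 * c0.getD ((K : Int) + 1 - 1 - h).toNat 0)).sum
      = ((cs.dropLast.zip cs.dropLast.reverse).map (fun q => q.1 * q.2)).sum := by
    rw [hrange, List.map_map]
    simp only [Function.comp_def]
    rw [hlist]
  have hB : stepSpec gf cs ((K : Int) + 1)
      = cs ++ [posRemainder ((0 + ((cs.dropLast.zip cs.dropLast.reverse).map (fun q => q.1 * q.2)).sum)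
          * (3 * modInverse (((K : Int) + 1 - 2) * (2 * ((K : Int) + 1) + 3)) gf)) gf] := by
    simp only [stepSpec]
    rw [PySem.List.foldl_add (g := fun q : Int × Int => q.1 * q.2)]
    simp only [mul_assoc]
  unfold stepA
  simp only [hkk]
  rw [innerA gf ((K : Int) + 1) (K + 1) _ (by rw [← hkk] at hread ⊢; exact hread) c0 hlen 0]
  have hgd : ∀ v : Int, (c0.set (K + 1) v).getD (K + 1) 0 = v :=
    fun v => getD_set_self' _ _ _ hlen
  simp only [List.set_set, hgd]
  rw [key, hB]
  rw [hc0, hKdef, set_cons_append _ _ _ hp]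

lemma len_stepSpec (gf : Int) (cs : List Int) (k : Int) :
    (stepSpec gf cs k).length = cs.length + 1 := by
  simp [stepSpec]

-- A-side loop invariant: after n outer iterations A's array is 0 :: (spec list) ++ padding
lemma mainInvA (gf terms c1 c2 : Int) (ht : 2 ≤ terms) :
    ∀ n : Nat, (n : Int) ≤ terms - 2 →
    ((PySem.List.pyRange 3 (3 + (n : Int)) 1).foldl (stepSpec gf) [c1, c2]).length = n + 2 ∧
    (PySem.List.pyRange 3 (3 + (n : Int)) 1).foldl (stepA gf)
        (((List.replicate (terms + 1).toNat 0).set 1 c1).set 2 c2)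
      = 0 :: ((PySem.List.pyRange 3 (3 + (n : Int)) 1).foldl (stepSpec gf) [c1, c2])
          ++ List.replicate (terms - 2 - (n : Int)).toNat 0 := by
  intro n
  induction n with
  | zero =>
    intro _
    rw [show ((3 : Int) + ((0 : Nat) : Int)) = 3 from by norm_num]
    rw [PySem.List.pyRange_one_eq_nil (le_refl 3)]
    simp only [List.foldl_nil]
    refine ⟨rfl, ?_⟩
    rw [show (terms + 1).toNat = (terms - 2).toNat + 3 from by omega]
    rw [show (terms - 2 - ((0 : Nat) : Int)) = terms - 2 from by norm_num]
    simp [List.replicate_succ]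
  | succ n ih =>
    intro hn
    have hn' : (n : Int) ≤ terms - 2 := by push_cast at hn ⊢; omega
    obtain ⟨ihl, ihe⟩ := ih hn'
    have hsplit : PySem.List.pyRange 3 (3 + ((n + 1 : Nat) : Int)) 1
        = PySem.List.pyRange 3 (3 + (n : Int)) 1 ++ [3 + (n : Int)] := by
      rw [show (3 : Int) + ((n + 1 : Nat) : Int) = (3 + (n : Int)) + 1 from by push_cast; ring]
      exact PySem.List.pyRange_one_succ_right (by omega)
    rw [hsplit, List.foldl_append, List.foldl_append]
    simp only [List.foldl_cons, List.foldl_nil]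
    constructor
    · rw [len_stepSpec, ihl]
    · rw [ihe]
      set csn := (PySem.List.pyRange 3 (3 + (n : Int)) 1).foldl (stepSpec gf) [c1, c2] with hcsn
      rw [show (3 : Int) + (n : Int) = ((csn.length : Int) + 1) from by rw [ihl]; push_cast; ring]
      rw [step_eq gf csn ((terms - 2 - (n : Int)).toNat) (by omega) (by omega)]
      rw [show (terms - 2 - (n : Int)).toNat - 1 = (terms - 2 - ((n + 1 : Nat) : Int)).toNat from by omega]

-- ---------- B-side machinery ----------

lemma sum_map_range_eq (n : Nat) (g : Nat → Int) :
    ((List.range n).map g).sum = ∑ i ∈ Finset.range n, g i := by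
  induction n with
  | zero => simp
  | succ n ih => rw [List.range_succ, Finset.sum_range_succ]; simp [ih]

-- single-hit evaluation of an indicator sum over Finset.range
lemma sum_range_hit (n s m : Nat) (g : Nat → Int) :
    (∑ i ∈ Finset.range n, if i + s = m then g i else 0)
      = if s ≤ m ∧ m - s < n then g (m - s) else 0 := by
  by_cases hs : s ≤ m
  · have hiff : ∀ i : Nat, (i + s = m) ↔ (i = m - s) := fun i => by omega
    simp only [hiff]
    rw [Finset.sum_ite_eq' (Finset.range n) (m - s) g]
    simp only [Finset.mem_range]
    split_ifs with h1 h2 h2 <;> first | rfl | omega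
  · have hz : ∀ i ∈ Finset.range n, (if i + s = m then g i else 0) = 0 := by
      intro i _; rw [if_neg (by omega)]
    rw [Finset.sum_congr rfl hz]
    simp
    omega

lemma gsum_succ (c : List Int) (t m : Nat) :
    gsum c (t + 1) m = gsum c t m
      + (if t + 2 ≤ m ∧ m - (t + 2) < t + 1 then c.getD (m - (t + 2)) 0 * c.getD (t + 1) 0 else 0)
      + (if t + 2 ≤ m ∧ m - (t + 2) < t + 1 then c.getD (t + 1) 0 * c.getD (m - (t + 2)) 0 else 0)
      + (if (t + 1) + (t + 1) + 1 = m then c.getD (t + 1) 0 * c.getD (t + 1) 0 else 0) := by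
  have h1 : ∀ (n : Nat) (f : Nat → Int),
      (∑ x ∈ Finset.range (n + 1), f x) = (∑ x ∈ Finset.range n, f x) + f n :=
    fun n f => Finset.sum_range_succ f n
  unfold gsum
  rw [h1 (t + 1)]
  have hinner : (∑ i ∈ Finset.range (t + 1), ∑ j ∈ Finset.range (t + 1 + 1),
        (if i + j + 1 = m then c.getD i 0 * c.getD j 0 else 0))
      = (∑ i ∈ Finset.range (t + 1), ((∑ j ∈ Finset.range (t + 1),
          (if i + j + 1 = m then c.getD i 0 * c.getD j 0 else 0))
        + (if i + (t + 1) + 1 = m then c.getD i 0 * c.getD (t + 1) 0 else 0))) := by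
    exact Finset.sum_congr rfl (fun i _ => h1 (t + 1) _)
  rw [hinner, Finset.sum_add_distrib, h1 (t + 1)]
  have hrow : (∑ i ∈ Finset.range (t + 1), if i + (t + 1) + 1 = m then c.getD i 0 * c.getD (t + 1) 0 else 0)
      = if t + 2 ≤ m ∧ m - (t + 2) < t + 1 then c.getD (m - (t + 2)) 0 * c.getD (t + 1) 0 else 0 := by
    have : ∀ i : Nat, (i + (t + 1) + 1 = m) ↔ (i + (t + 2) = m) := fun i => by omega
    simp only [this]
    exact sum_range_hit (t + 1) (t + 2) m _
  have hcol : (∑ j ∈ Finset.range (t + 1), if (t + 1) + j + 1 = m then c.getD (t + 1) 0 * c.getD j 0 else 0)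
      = if t + 2 ≤ m ∧ m - (t + 2) < t + 1 then c.getD (t + 1) 0 * c.getD (m - (t + 2)) 0 else 0 := by
    have : ∀ j : Nat, ((t + 1) + j + 1 = m) ↔ (j + (t + 2) = m) := fun j => by omega
    simp only [this]
    exact sum_range_hit (t + 1) (t + 2) m _
  rw [hrow, hcol]
  ring

-- gsum only reads indices ≤ t
lemma gsum_congr (c1 c2 : List Int) (t m : Nat)
    (h : ∀ i : Nat, i ≤ t → c1.getD i 0 = c2.getD i 0) :
    gsum c1 t m = gsum c2 t m := by
  unfold gsum
  refine Finset.sum_congr rfl (fun i hi => Finset.sum_congr rfl (fun j hj => ?_))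
  rw [Finset.mem_range] at hi hj
  rw [h i (by omega), h j (by omega)]

lemma gsum_zero (c : List Int) (m : Nat) (hc0 : c.getD 0 0 = 0) : gsum c 0 m = 0 := by
  unfold gsum
  rw [Finset.sum_range_one, Finset.sum_range_one]
  split_ifs
  · rw [hc0]; ring
  · rfl

-- pointwise effect of the scatter j-loop
lemma scatJ_foldl (terms : Int) (c : List Int) (k : Int) (hk : 1 ≤ k) (m : Nat)
    (hm : (m : Int) ≤ terms) :
    ∀ (js : List Int), (∀ j ∈ js, 1 ≤ j) → ∀ acc : List Int, acc.length = (terms + 1).toNat →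
    ((js.foldl (scatJ terms c k) acc).getD m 0
      = acc.getD m 0 + (js.map (fun j =>
          if k + j + 1 = (m : Int) then 2 * c.getD k.toNat 0 * c.getD j.toNat 0 else 0)).sum)
    ∧ (js.foldl (scatJ terms c k) acc).length = acc.length := by
  intro js
  induction js with
  | nil => intro _ acc _; simp
  | cons j t ih =>
    intro hjs acc hlen
    have hj1 : 1 ≤ j := hjs j (by simp)
    have ht : ∀ x ∈ t, 1 ≤ x := fun x hx => hjs x (by simp [hx])
    simp only [List.foldl_cons, List.map_cons, List.sum_cons]
    by_cases hg : k + j + 1 ≤ terms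
    · have hstep : scatJ terms c k acc j
          = acc.set (k + j + 1).toNat (acc.getD (k + j + 1).toNat 0 + 2 * c.getD k.toNat 0 * c.getD j.toNat 0) := by
        simp [scatJ, hg]
      obtain ⟨ihv, ihl⟩ := ih ht (scatJ terms c k acc j) (by rw [hstep]; simp [hlen])
      refine ⟨?_, by rw [ihl, hstep]; simp⟩
      rw [ihv, hstep]
      by_cases he : k + j + 1 = (m : Int)
      · have hidx : (k + j + 1).toNat = m := by omega
        rw [hidx, if_pos he, getD_set_self' _ _ _ (by omega)]
        ring
      · have hidx : (k + j + 1).toNat ≠ m := by omega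
        rw [getD_set_ne' _ _ _ _ (Ne.symm hidx), if_neg he]
        ring
    · have hstep : scatJ terms c k acc j = acc := by simp [scatJ, hg]
      obtain ⟨ihv, ihl⟩ := ih ht (scatJ terms c k acc j) (by rw [hstep]; exact hlen)
      refine ⟨?_, by rw [ihl, hstep]⟩
      rw [ihv, hstep, if_neg (by omega)]
      ring

-- pointwise effect of one whole scatter
lemma scatter_getD (terms : Int) (c acc : List Int) (k : Int) (hk : 1 ≤ k)
    (hlen : acc.length = (terms + 1).toNat) (m : Nat) (hm : (m : Int) ≤ terms) :
    (scatterB terms c acc k).getD m 0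
      = acc.getD m 0
        + (if k.toNat + 2 ≤ m ∧ m ≤ 2 * k.toNat then
            2 * c.getD k.toNat 0 * c.getD (m - k.toNat - 1) 0 else 0)
        + (if m = 2 * k.toNat + 1 then c.getD k.toNat 0 * c.getD k.toNat 0 else 0) := by
  have hjs : ∀ j ∈ PySem.List.pyRange 1 k 1, 1 ≤ j := by
    intro j hj; rw [PySem.List.mem_pyRange_one] at hj; omega
  obtain ⟨hv, hl⟩ := scatJ_foldl terms c k hk m hm (PySem.List.pyRange 1 k 1) hjs acc hlen
  have hsum : ((PySem.List.pyRange 1 k 1).map (fun j =>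
        if k + j + 1 = (m : Int) then 2 * c.getD k.toNat 0 * c.getD j.toNat 0 else 0)).sum
      = (if k.toNat + 2 ≤ m ∧ m ≤ 2 * k.toNat then
          2 * c.getD k.toNat 0 * c.getD (m - k.toNat - 1) 0 else 0) := by
    rw [PySem.List.pyRange_one, List.map_map]
    simp only [Function.comp_def]
    by_cases hc : k.toNat + 2 ≤ m
    · have hiff : ∀ j0 : Nat, (k + (1 + (j0 : Int)) + 1 = (m : Int)) ↔ (j0 = m - k.toNat - 2) :=
        fun j0 => by omega
      simp only [hiff]
      rw [sum_map_range_eq]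
      rw [Finset.sum_ite_eq' (Finset.range (k - 1).toNat) (m - k.toNat - 2)
        (fun j0 => 2 * c.getD k.toNat 0 * c.getD ((1 : Int) + (j0 : Int)).toNat 0)]
      simp only [Finset.mem_range]
      split_ifs with h1 h2 h2
      · rw [show ((1 : Int) + ((m - k.toNat - 2 : Nat) : Int)).toNat = m - k.toNat - 1 from by omega]
      · omega
      · omega
      · rfl
    · have hz : ∀ j0 : Nat, (if k + (1 + (j0 : Int)) + 1 = (m : Int)
          then 2 * c.getD k.toNat 0 * c.getD ((1 : Int) + (j0 : Int)).toNat 0 else 0) = 0 :=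
        fun j0 => if_neg (by omega)
      simp only [hz, if_neg (by omega : ¬(k.toNat + 2 ≤ m ∧ m ≤ 2 * k.toNat))]
      simp
  unfold scatterB
  by_cases hd : 2 * k + 1 ≤ terms
  · rw [if_pos hd]
    by_cases he : m = 2 * k.toNat + 1
    · have hidx : (2 * k + 1).toNat = m := by omega
      rw [hidx, getD_set_self' _ _ _ (by omega), hv, hsum, if_pos he]
    · have hidx : (2 * k + 1).toNat ≠ m := by omega
      rw [getD_set_ne' _ _ _ _ (Ne.symm hidx), hv, hsum, if_neg he]
      ring
  · rw [if_neg hd, hv, hsum, if_neg (by omega : ¬ m = 2 * k.toNat + 1)]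
    ring

lemma scatter_len (terms : Int) (c acc : List Int) (k : Int) :
    (scatterB terms c acc k).length = acc.length := by
  unfold scatterB
  have : ∀ js : List Int, ∀ acc : List Int, (js.foldl (scatJ terms c k) acc).length = acc.length := by
    intro js
    induction js with
    | nil => intro acc; rfl
    | cons j t ih => intro acc; rw [List.foldl_cons, ih]; simp [scatJ]; split <;> simp
  split <;> simp [this]

-- scatter advances the gsum invariant from t = k-1 to t = k
lemma scatter_gsum (terms : Int) (c acc : List Int) (k : Int) (hk : 1 ≤ k)
    (hlen : acc.length = (terms + 1).toNat) (hc0 : c.getD 0 0 = 0)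
    (hacc : ∀ m : Nat, (m : Int) ≤ terms → acc.getD m 0 = gsum c (k.toNat - 1) m) :
    ∀ m : Nat, (m : Int) ≤ terms → (scatterB terms c acc k).getD m 0 = gsum c k.toNat m := by
  intro m hm
  obtain ⟨t, hTt⟩ : ∃ t, k.toNat = t + 1 := ⟨k.toNat - 1, by omega⟩
  rw [scatter_getD terms c acc k hk hlen m hm, hacc m hm, hTt,
    show t + 1 - 1 = t from rfl, gsum_succ c t m]
  by_cases h1 : t + 2 ≤ m ∧ m - (t + 2) < t + 1
  · rw [if_pos h1, if_pos h1]
    by_cases h2 : t + 3 ≤ m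
    · rw [if_pos (by omega : t + 1 + 2 ≤ m ∧ m ≤ 2 * (t + 1)),
        if_neg (by omega : ¬ m = 2 * (t + 1) + 1),
        if_neg (by omega : ¬ (t + 1) + (t + 1) + 1 = m),
        show m - (t + 1) - 1 = m - (t + 2) from by omega]
      ring
    · have hm2 : m = t + 2 := by omega
      rw [show m - (t + 2) = 0 from by omega, hc0,
        if_neg (by omega : ¬ (t + 1 + 2 ≤ m ∧ m ≤ 2 * (t + 1))),
        if_neg (by omega : ¬ m = 2 * (t + 1) + 1),
        if_neg (by omega : ¬ (t + 1) + (t + 1) + 1 = m)]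
      ring
  · rw [if_neg h1, if_neg h1]
    by_cases h3 : m = 2 * (t + 1) + 1
    · rw [if_pos h3, if_pos (by omega : (t + 1) + (t + 1) + 1 = m),
        if_neg (by omega : ¬ (t + 1 + 2 ≤ m ∧ m ≤ 2 * (t + 1)))]
      ring
    · rw [if_neg h3, if_neg (by omega : ¬ (t + 1) + (t + 1) + 1 = m),
        if_neg (by omega : ¬ (t + 1 + 2 ≤ m ∧ m ≤ 2 * (t + 1)))]
      ring

-- the full gather A needs for c[K+1] equals gsum at t = K, on the invariant shape
lemma sum_drop_ends (K' : Nat) (g : Nat → Int) (h0 : g 0 = 0) (hK : g (K' + 2) = 0) :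
    (∑ i ∈ Finset.range (K' + 3), g i) = ∑ i0 ∈ Finset.range (K' + 1), g (i0 + 1) := by
  rw [show K' + 3 = (K' + 2) + 1 from rfl, Finset.sum_range_succ, hK, add_zero,
    show K' + 2 = (K' + 1) + 1 from rfl, Finset.sum_range_succ', h0, add_zero]

lemma gather_eq_zip (cs : List Int) (p : Nat) (hK : 2 ≤ cs.length) :
    gsum (0 :: cs ++ List.replicate p 0) cs.length (cs.length + 1)
      = (cs.dropLast.zip cs.dropLast.reverse).foldl (fun s q => s + q.1 * q.2) 0 := by
  obtain ⟨K', hKdef⟩ : ∃ K', cs.length = K' + 2 := ⟨cs.length - 2, by omega⟩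
  set c0 : List Int := 0 :: cs ++ List.replicate p 0 with hc0
  have hz0 : c0.getD 0 0 = 0 := by rw [hc0]; rfl
  have hbody : cs.dropLast.length = K' + 1 := by simp [hKdef]
  have hinner : ∀ i ∈ Finset.range (K' + 3),
      (∑ j ∈ Finset.range (K' + 3), if i + j + 1 = K' + 2 + 1 then c0.getD i 0 * c0.getD j 0 else 0)
        = c0.getD i 0 * c0.getD (K' + 2 - i) 0 := by
    intro i hi
    rw [Finset.mem_range] at hi
    have hiff : ∀ j : Nat, (i + j + 1 = K' + 2 + 1) ↔ (j + i = K' + 2) := fun j => by omega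
    simp only [hiff]
    rw [sum_range_hit (K' + 3) i (K' + 2) (fun j => c0.getD i 0 * c0.getD j 0)]
    rw [if_pos (by omega : i ≤ K' + 2 ∧ K' + 2 - i < K' + 3)]
  have hmain : gsum c0 cs.length (cs.length + 1)
      = ∑ i ∈ Finset.range (K' + 3), c0.getD i 0 * c0.getD (K' + 2 - i) 0 := by
    unfold gsum
    rw [hKdef]
    exact Finset.sum_congr rfl hinner
  have hzip : ((cs.dropLast.zip cs.dropLast.reverse).map (fun q => q.1 * q.2)).sum
      = ∑ i0 ∈ Finset.range (K' + 1), cs.getD i0 0 * cs.getD (K' - i0) 0 := by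
    rw [← sum_map_range_eq]
    congr 1
    apply List.ext_getElem
    · simp [hbody]
    · intro i hi1 hi2
      have hiK : i < K' + 1 := by simpa [hbody] using hi1
      simp only [List.getElem_map, List.getElem_range, List.getElem_zip, List.getElem_reverse,
        List.getElem_dropLast, hbody]
      rw [List.getD_eq_getElem _ _ (show i < cs.length from by omega),
        List.getD_eq_getElem _ _ (show K' - i < cs.length from by omega)]
      congr 2 <;> omega
  have hdrop : (∑ i ∈ Finset.range (K' + 3), c0.getD i 0 * c0.getD (K' + 2 - i) 0)
      = ∑ i0 ∈ Finset.range (K' + 1), c0.getD (i0 + 1) 0 * c0.getD (K' + 2 - (i0 + 1)) 0 := by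
    apply sum_drop_ends K' (fun i => c0.getD i 0 * c0.getD (K' + 2 - i) 0)
    · rw [hz0]; ring
    · rw [show K' + 2 - (K' + 2) = 0 from by omega, hz0]; ring
  have hre : ∀ i0 ∈ Finset.range (K' + 1),
      c0.getD (i0 + 1) 0 * c0.getD (K' + 2 - (i0 + 1)) 0 = cs.getD i0 0 * cs.getD (K' - i0) 0 := by
    intro i0 hi0
    rw [Finset.mem_range] at hi0
    rw [hc0, getD_cons_append _ _ _ (by omega) (by omega),
      getD_cons_append _ _ _ (by omega) (by omega)]
    congr 2 <;> omega
  rw [hmain, PySem.List.foldl_add (g := fun q : Int × Int => q.1 * q.2), hzip, hdrop,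
    Finset.sum_congr rfl hre]
  ring

-- B-side loop invariant
lemma mainInvB (gf terms c1 c2 : Int) (ht : 2 ≤ terms) (acc0 : List Int)
    (hlen0 : acc0.length = (terms + 1).toNat)
    (hacc0 : ∀ m : Nat, (m : Int) ≤ terms →
      acc0.getD m 0 = gsum (0 :: [c1, c2] ++ List.replicate (terms - 2).toNat 0) 2 m) :
    ∀ n : Nat, (n : Int) ≤ terms - 2 →
    ((PySem.List.pyRange 3 (3 + (n : Int)) 1).foldl (stepB terms gf)
        (0 :: [c1, c2] ++ List.replicate (terms - 2).toNat 0, acc0)).1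
      = 0 :: ((PySem.List.pyRange 3 (3 + (n : Int)) 1).foldl (stepSpec gf) [c1, c2])
          ++ List.replicate (terms - 2 - (n : Int)).toNat 0 ∧
    ((PySem.List.pyRange 3 (3 + (n : Int)) 1).foldl (stepB terms gf)
        (0 :: [c1, c2] ++ List.replicate (terms - 2).toNat 0, acc0)).2.length = (terms + 1).toNat ∧
    ∀ m : Nat, (m : Int) ≤ terms →
      ((PySem.List.pyRange 3 (3 + (n : Int)) 1).foldl (stepB terms gf)
        (0 :: [c1, c2] ++ List.replicate (terms - 2).toNat 0, acc0)).2.getD m 0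
      = gsum (((PySem.List.pyRange 3 (3 + (n : Int)) 1).foldl (stepB terms gf)
        (0 :: [c1, c2] ++ List.replicate (terms - 2).toNat 0, acc0)).1) (n + 2) m := by
  intro n
  induction n with
  | zero =>
    intro _
    rw [show ((3 : Int) + ((0 : Nat) : Int)) = 3 from by norm_num]
    rw [PySem.List.pyRange_one_eq_nil (le_refl 3)]
    simp only [List.foldl_nil]
    exact ⟨by rw [show (terms - 2 - ((0 : Nat) : Int)) = terms - 2 from by norm_num], hlen0,
      fun m hm => hacc0 m hm⟩
  | succ n ih =>
    intro hn
    have hn' : (n : Int) ≤ terms - 2 := by push_cast at hn ⊢; omega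
    obtain ⟨ihc, ihl, ihacc⟩ := ih hn'
    have hFlen := (mainInvA gf terms c1 c2 ht n hn').1
    have hsplit : PySem.List.pyRange 3 (3 + ((n + 1 : Nat) : Int)) 1
        = PySem.List.pyRange 3 (3 + (n : Int)) 1 ++ [3 + (n : Int)] := by
      rw [show (3 : Int) + ((n + 1 : Nat) : Int) = (3 + (n : Int)) + 1 from by push_cast; ring]
      exact PySem.List.pyRange_one_succ_right (by omega)
    rw [hsplit, List.foldl_append, List.foldl_append]
    simp only [List.foldl_cons, List.foldl_nil]
    set st := (PySem.List.pyRange 3 (3 + (n : Int)) 1).foldl (stepB terms gf)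
      (0 :: [c1, c2] ++ List.replicate (terms - 2).toNat 0, acc0) with hst
    set F := (PySem.List.pyRange 3 (3 + (n : Int)) 1).foldl (stepSpec gf) [c1, c2] with hF
    set k : Int := 3 + (n : Int) with hkdef
    have hkn : k.toNat = n + 3 := by omega
    have hkterms : k ≤ terms := by omega
    have hp : 0 < (terms - 2 - (n : Int)).toNat := by omega
    -- the value B finalizes equals the spec's appended value
    have hval : st.2.getD k.toNat 0
        = (F.dropLast.zip F.dropLast.reverse).foldl (fun s q => s + q.1 * q.2) 0 := by
      rw [hkn, ihacc (n + 3) (by omega), ihc]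
      rw [show n + 2 = F.length from by omega]
      rw [show n + 3 = F.length + 1 from by omega]
      exact gather_eq_zip F _ (by omega)
    have hcnew : st.1.set k.toNat
          (posRemainder (st.2.getD k.toNat 0 * 3 * modInverse ((k - 2) * (2 * k + 3)) gf) gf)
        = 0 :: stepSpec gf F k ++ List.replicate ((terms - 2 - (n : Int)).toNat - 1) 0 := by
      rw [hval, ihc, hkn, show n + 3 = F.length + 1 from by omega]
      rw [set_cons_append F _ _ hp]
      rfl
    have hstep : stepB terms gf st k
        = (0 :: stepSpec gf F k ++ List.replicate ((terms - 2 - (n : Int)).toNat - 1) 0,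
           scatterB terms (0 :: stepSpec gf F k ++ List.replicate ((terms - 2 - (n : Int)).toNat - 1) 0) st.2 k) := by
      unfold stepB
      rw [hcnew]
    rw [hstep]
    set cnew := 0 :: stepSpec gf F k ++ List.replicate ((terms - 2 - (n : Int)).toNat - 1) 0 with hcnewdef
    have hpad : (terms - 2 - (n : Int)).toNat - 1 = (terms - 2 - ((n + 1 : Nat) : Int)).toNat := by
      omega
    refine ⟨?_, by rw [scatter_len]; exact ihl, ?_⟩
    · show cnew = _
      rw [hcnewdef, hpad]
    intro m hm
    have hagree : ∀ i : Nat, i ≤ n + 2 → st.1.getD i 0 = cnew.getD i 0 := by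
      intro i hi
      rw [ihc, hcnewdef]
      rcases Nat.eq_zero_or_pos i with hi0 | hipos
      · subst hi0; rfl
      · rw [getD_cons_append _ _ _ (by omega) (by omega),
          getD_cons_append _ _ _ (by omega) (by rw [len_stepSpec]; omega)]
        simp only [stepSpec]
        rw [List.getD_eq_getElem?_getD, List.getD_eq_getElem?_getD,
          List.getElem?_append_left (show i - 1 < F.length from by omega)]
    have hacc' : ∀ m : Nat, (m : Int) ≤ terms → st.2.getD m 0 = gsum cnew (k.toNat - 1) m := by
      intro m hm
      rw [ihacc m hm, hkn, show n + 3 - 1 = n + 2 from rfl]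
      exact gsum_congr _ _ _ _ hagree
    have hc0 : cnew.getD 0 0 = 0 := by rw [hcnewdef]; rfl
    rw [scatter_gsum terms cnew st.2 k (by omega) ihl hc0 hacc' m hm, hkn]

-- ===== VERDICT (by name: the statement is the Claim_ definition above) =====
theorem getCk_spec : Claim_equal_getCk := by
  intro terms a b gf _ hpre
  obtain ⟨ht0, -⟩ := hpre
  unfold Spec_getCk
  by_cases h0 : terms = 0
  · subst h0
    norm_num [getCk, getCk_alt, List.replicate]
  by_cases h1 : terms = 1
  · subst h1
    norm_num [getCk, getCk_alt, List.replicate]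
  -- terms ≥ 2
  have h2 : 2 ≤ terms := by omega
  set c1 := posRemainder (-a * modInverse 5 gf) gf with hc1
  set c2 := posRemainder (-b * modInverse 7 gf) gf with hc2
  have hshape : ((List.replicate (terms + 1).toNat 0).set 1 c1).set 2 c2
      = 0 :: [c1, c2] ++ List.replicate (terms - 2).toNat 0 := by
    rw [show (terms + 1).toNat = (terms - 2).toNat + 3 from by omega]
    simp [List.replicate_succ]
  have hshape1 : (List.replicate (terms + 1).toNat 0).set 1 c1
      = 0 :: c1 :: 0 :: List.replicate (terms - 2).toNat 0 := by
    rw [show (terms + 1).toNat = (terms - 2).toNat + 3 from by omega]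
    simp [List.replicate_succ]
  -- the initial accumulator after scatter(1); scatter(2) satisfies the gsum invariant
  have hzlen : (List.replicate (terms + 1).toNat (0 : Int)).length = (terms + 1).toNat := by simp
  have hzget : ∀ m : Nat, (List.replicate (terms + 1).toNat (0 : Int)).getD m 0 = 0 := by
    intro m
    rw [List.getD_eq_getElem?_getD, List.getElem?_replicate]
    split <;> rfl
  have hc1g : ∀ m : Nat, (m : Int) ≤ terms →
      (scatterB terms ((List.replicate (terms + 1).toNat 0).set 1 c1)
        (List.replicate (terms + 1).toNat 0) 1).getD m 0
      = gsum ((List.replicate (terms + 1).toNat 0).set 1 c1) 1 m := by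
    apply scatter_gsum terms _ _ 1 (by omega) hzlen
    · rw [hshape1]; rfl
    · intro m hm
      rw [hzget m]
      exact (gsum_zero _ m (by rw [hshape1]; rfl)).symm
  have hlen1 : (scatterB terms ((List.replicate (terms + 1).toNat 0).set 1 c1)
      (List.replicate (terms + 1).toNat 0) 1).length = (terms + 1).toNat := by
    rw [scatter_len]; exact hzlen
  have hacc0 : ∀ m : Nat, (m : Int) ≤ terms →
      (scatterB terms (0 :: [c1, c2] ++ List.replicate (terms - 2).toNat 0)
        (scatterB terms ((List.replicate (terms + 1).toNat 0).set 1 c1)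
          (List.replicate (terms + 1).toNat 0) 1) 2).getD m 0
      = gsum (0 :: [c1, c2] ++ List.replicate (terms - 2).toNat 0) 2 m := by
    apply scatter_gsum terms _ _ 2 (by omega) hlen1
    · rfl
    · intro m hm
      rw [hc1g m hm]
      apply gsum_congr
      intro i hi
      rw [hshape1]
      interval_cases i <;> rfl
  have hlen0 : (scatterB terms (0 :: [c1, c2] ++ List.replicate (terms - 2).toNat 0)
      (scatterB terms ((List.replicate (terms + 1).toNat 0).set 1 c1)
        (List.replicate (terms + 1).toNat 0) 1) 2).length = (terms + 1).toNat := by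
    rw [scatter_len]; exact hlen1
  obtain ⟨-, heA⟩ := mainInvA gf terms c1 c2 h2 (terms - 2).toNat (by omega)
  obtain ⟨heB, -, -⟩ := mainInvB gf terms c1 c2 h2 _ hlen0 hacc0 (terms - 2).toNat (by omega)
  rw [show (3 : Int) + (((terms - 2).toNat : Nat) : Int) = terms + 1 from by omega] at heA heB
  rw [show (terms - 2 - (((terms - 2).toNat : Nat) : Int)).toNat = 0 from by omega] at heA heB
  simp only [List.replicate_zero, List.append_nil] at heA heB
  have hb0 : (terms == 0) = false := by simp [h0]
  have hb1 : (terms == 1) = false := by simp [h1]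
  unfold getCk getCk_alt
  simp only [hb0, hb1, Bool.false_eq_true, if_false]
  show List.foldl (stepA gf) (((List.replicate (terms + 1).toNat 0).set 1 c1).set 2 c2)
        (PySem.List.pyRange 3 (terms + 1) 1)
      = (List.foldl (stepB terms gf) (((List.replicate (terms + 1).toNat 0).set 1 c1).set 2 c2,
          scatterB terms (((List.replicate (terms + 1).toNat 0).set 1 c1).set 2 c2)
            (scatterB terms ((List.replicate (terms + 1).toNat 0).set 1 c1)
              (List.replicate (terms + 1).toNat 0) 1) 2)
          (PySem.List.pyRange 3 (terms + 1) 1)).1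
  rw [hshape] at heA ⊢
  rw [heA, heB]
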